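-- pv_equiv track=rewrite | github.com/pwmcclung/newCodeProbs | max_earned.py | maximize_earnings
-- ===== SOURCE A (Python) =====
-- def maximize_earnings(earnings, k):
--     n = len(earnings)
--     if n == 0:
--         return 0
--
--     dp = [[-1] * (k + 1) for _ in range(n)]
--
--     dp[0][0] = 0
--     dp[0][1] = earnings[0]
--
--     for i in range(1, n):
--         max_prev_earned = 0
--         for j in range(k + 1):
--             max_prev_earned = max(max_prev_earned, dp[i-1][j])
--         dp[i][0] = max_prev_earned
--
--         for j in range(1, k + 1):
--             if dp[i-1][j-1] != -1:
--                 dp[i][j] = dp[i-1][j-1] + earnings[i]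
--
--     max_total_earned = 0
--     for j in range(k + 1):
--         max_total_earned = max(max_total_earned, dp[n-1][j])
--
--     return max_total_earned
-- ===== SOURCE B (Python) =====
-- def maximize_earnings(earnings, k):
--     n = len(earnings)
--     pre = [0] * (n + 1)
--     for i in range(n):
--         pre[i + 1] = pre[i] + earnings[i]
--     f = [0] * (n + 1)
--     for i in range(1, n + 1):
--         best = f[i - 1]
--         m = k if k < i else i
--         for j in range(1, m + 1):
--             start = i - j
--             before = f[start - 1] if start >= 1 else 0
--             best = max(best, before + pre[i] - pre[start])
--         f[i] = best
--     return f[n]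
-- ===== Notes on version B (the rewrite author's own statement) =====
-- stated objective: alternative
-- what changed: Replaces A's O(n*k)-time, O(n*k)-memory two-dimensional run-length table with -1 sentinels by a one-dimensional break-position DP over prefix sums (f[i] = best for the first i elements, maximizing over the length of the selected run ending at i-1), using O(n) memory and O(n*min(n,k)) time.
import Mathlib
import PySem

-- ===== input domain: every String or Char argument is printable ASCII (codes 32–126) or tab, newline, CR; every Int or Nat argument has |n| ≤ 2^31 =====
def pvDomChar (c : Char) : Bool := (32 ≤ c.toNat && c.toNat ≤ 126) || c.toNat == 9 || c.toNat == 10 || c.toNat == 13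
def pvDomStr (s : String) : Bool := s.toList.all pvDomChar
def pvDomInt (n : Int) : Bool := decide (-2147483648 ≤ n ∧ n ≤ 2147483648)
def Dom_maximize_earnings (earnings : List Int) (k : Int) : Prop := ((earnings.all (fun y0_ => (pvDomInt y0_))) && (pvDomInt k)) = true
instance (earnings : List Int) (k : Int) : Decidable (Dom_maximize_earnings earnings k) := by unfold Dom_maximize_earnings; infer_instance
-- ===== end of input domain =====

-- B replaces A's O(n·k) two-dimensional run-length/sentinel table with a one-dimensional
-- break-position DP over prefix sums (O(n·min(n,k)) time, O(n) memory); equivalence of the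
-- returned value is proved below (neither program mutates its arguments observably).

-- ===== PORT A =====
-- Literal port of A.  dp is built row by row; only dp[i-1] is read by iteration i, so the
-- fold carries the previous row (the same (k+1)-wide list A's rows are, same cells, same order).
def maximize_earnings (earnings : List Int) (k : Int) : Int :=
  let n := earnings.length
  if n = 0 then 0
  else
    let K := (k + 1).toNat                       -- row width k+1 (Pre_ gives k ≥ 1 here)
    let row0 := ((List.replicate K (-1 : Int)).set 0 0).set 1 (earnings.getD 0 0)
    let last := (List.range' 1 (n - 1)).foldl (fun prev i =>
      let mx := (List.range K).foldl (fun m j => max m (prev.getD j 0)) 0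
      let base := (List.replicate K (-1 : Int)).set 0 mx
      (List.range' 1 (K - 1)).foldl (fun row j =>
        if prev.getD (j - 1) 0 ≠ -1 then row.set j (prev.getD (j - 1) 0 + earnings.getD i 0)
        else row) base) row0
    (List.range K).foldl (fun m j => max m (last.getD j 0)) 0

-- ===== PORT B =====
-- Literal port of B (Source B): prefix sums `pre`, then f[i] = best for the first i elements,
-- maximizing over the length j of the selected run ending at element i-1 (j = 0 gives f[i-1]).
def maximize_earnings_alt (earnings : List Int) (k : Int) : Int :=
  let n := earnings.length
  let pre := (List.range n).foldl (fun p i => p ++ [p.getD i 0 + earnings.getD i 0]) [(0 : Int)]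
  let f := (List.range' 1 n).foldl (fun f (i : ℕ) =>
    let m := (min k (i : Int)).toNat             -- python: k if k < i else i  (empty range if k ≤ 0)
    let best := (List.range' 1 m).foldl (fun best j =>
      let start := i - j
      let before := if 1 ≤ start then f.getD (start - 1) 0 else 0
      max best (before + pre.getD i 0 - pre.getD start 0)) (f.getD (i - 1) 0)
    f ++ [best]) [(0 : Int)]
  f.getD n 0

-- ===== PRECONDITION & SPEC =====
-- Pre_ excludes only inputs on which A raises: a nonempty list with k ≤ 0 hits the
-- IndexError in `dp[0][1] = earnings[0]` (row width k+1 ≤ 1).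
def Pre_maximize_earnings (earnings : List Int) (k : Int) : Prop :=
  earnings = [] ∨ 1 ≤ k
instance (earnings : List Int) (k : Int) : Decidable (Pre_maximize_earnings earnings k) := by
  unfold Pre_maximize_earnings; infer_instance
def pvWitness_maximize_earnings : List Int × Int := ([3, -1, 4], 2)


def Spec_maximize_earnings (earnings : List Int) (k : Int) (out : Int) : Prop :=
  out = maximize_earnings_alt earnings k
instance (earnings : List Int) (k : Int) (out : Int) : Decidable (Spec_maximize_earnings earnings k out) := by
  unfold Spec_maximize_earnings; infer_instance

-- ===== CLAIM (what is proved, stated in full; the proofs are below) =====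
def Claim_equal_maximize_earnings : Prop := ∀ (earnings : List Int) (k : Int), Dom_maximize_earnings earnings k → Pre_maximize_earnings earnings k → Spec_maximize_earnings earnings k (maximize_earnings earnings k)

-- ===== LEMMAS AND PROOFS =====

/- Mathematical models.  e : ℕ → Int is the earnings accessor, W = k.toNat ≥ 1 the cap. -/

-- prefix sums: pvPf e i = earnings[0] + … + earnings[i-1]
def pvPf (e : ℕ → Int) : ℕ → Int
  | 0 => 0
  | i + 1 => pvPf e i + e i

-- A's dp table, row i as a total function (cells j > W are never read; we give them -1)
def pvRow (e : ℕ → Int) (W : ℕ) : ℕ → ℕ → Int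
  | 0 => fun j => if j = 0 then 0 else if j = 1 then e 0 else -1
  | i + 1 => fun j =>
      if j = 0 then (List.range (W + 1)).foldl (fun m t => max m (pvRow e W i t)) 0
      else if j ≤ W then (if pvRow e W i (j - 1) ≠ -1 then pvRow e W i (j - 1) + e (i + 1) else -1)
      else -1

def pvMrow (e : ℕ → Int) (W : ℕ) (i : ℕ) : Int :=
  (List.range (W + 1)).foldl (fun m j => max m (pvRow e W i j)) 0

-- B's DP: list [f 0, …, f m] of best values
def pvFl (e : ℕ → Int) (W : ℕ) : ℕ → List Int
  | 0 => [0]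
  | m + 1 =>
      let fl := pvFl e W m
      let best := (List.range' 1 (min W (m + 1))).foldl (fun best j =>
        max best ((if 1 ≤ m + 1 - j then fl.getD (m + 1 - j - 1) 0 else 0)
          + pvPf e (m + 1) - pvPf e (m + 1 - j))) (fl.getD m 0)
      fl ++ [best]

def pvF (e : ℕ → Int) (W : ℕ) (m : ℕ) : Int := (pvFl e W m).getD m 0

-- value of the candidate "run of length j ends at element i" in f (i+1)
def pvV (e : ℕ → Int) (W : ℕ) (i j : ℕ) : Int :=
  (if 1 ≤ i + 1 - j then pvF e W (i - j) else 0) + pvPf e (i + 1) - pvPf e (i + 1 - j)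

-- ---- generic fold-max lemmas ----
theorem pv_foldl_max_le_iff (g : ℕ → Int) (l : List ℕ) (a c : Int) :
    (l.foldl (fun x y => max x (g y)) a) ≤ c ↔ a ≤ c ∧ ∀ b ∈ l, g b ≤ c := by
  induction l generalizing a with
  | nil => simp
  | cons h t ih =>
      simp only [List.foldl_cons, ih, max_le_iff, List.mem_cons]
      constructor
      · rintro ⟨⟨h1, h2⟩, h3⟩
        exact ⟨h1, fun b hb => hb.elim (fun e => e ▸ h2) (h3 b)⟩
      · rintro ⟨h1, h2⟩
        exact ⟨⟨h1, h2 h (Or.inl rfl)⟩, fun b hb => h2 b (Or.inr hb)⟩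

theorem pv_le_foldl_init (g : ℕ → Int) (l : List ℕ) (a : Int) :
    a ≤ l.foldl (fun x y => max x (g y)) a :=
  ((pv_foldl_max_le_iff g l a _).mp le_rfl).1

theorem pv_le_foldl_mem (g : ℕ → Int) (l : List ℕ) (a : Int) (b : ℕ) (hb : b ∈ l) :
    g b ≤ l.foldl (fun x y => max x (g y)) a :=
  ((pv_foldl_max_le_iff g l a _).mp le_rfl).2 b hb

-- ---- fold-of-sets lemmas (conditional writes into a preallocated row) ----
theorem pv_foldl_setif_length (l : List ℕ) (c : ℕ → Prop) [DecidablePred c] (v : ℕ → Int)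
    (r : List Int) :
    (l.foldl (fun r j => if c j then r.set j (v j) else r) r).length = r.length := by
  induction l generalizing r with
  | nil => rfl
  | cons h t ih => simp only [List.foldl_cons]; rw [ih]; split <;> simp

theorem pv_foldl_setif_getD (l : List ℕ) (c : ℕ → Prop) [DecidablePred c] (v : ℕ → Int)
    (r : List Int) (t : ℕ) (ht : t < r.length) :
    ((l.foldl (fun r j => if c j then r.set j (v j) else r) r).getD t 0)
      = if t ∈ l ∧ c t then v t else r.getD t 0 := by
  induction l generalizing r with
  | nil => simp
  | cons h s ih =>
      simp only [List.foldl_cons]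
      rw [ih]
      · by_cases hts : t ∈ s ∧ c t
        · simp [hts, List.mem_cons.2 (Or.inr hts.1)]
        · by_cases hth : h = t
          · subst hth
            by_cases hc : c h
            · simp [hc, List.getD, List.getElem?_set_self ht]
            · simp [hc]
          · have hget : (if c h then r.set h (v h) else r).getD t 0 = r.getD t 0 := by
              split
              · simp [List.getD, List.getElem?_set_ne hth]
              · rfl
            rw [hget, if_neg hts]
            have hnot : ¬ (t ∈ h :: s ∧ c t) := by
              rintro ⟨hm, hcc⟩
              rcases List.mem_cons.1 hm with h' | h'
              · exact hth h'.symm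
              · exact hts ⟨h', hcc⟩
            rw [if_neg hnot]
      · split <;> simpa using ht

-- ---- pvRow basic facts ----
theorem pvRow_succ_zero (e : ℕ → Int) (W i : ℕ) : pvRow e W (i + 1) 0 = pvMrow e W i := rfl

theorem pvRow_big (e : ℕ → Int) (W : ℕ) : ∀ i j, i + 1 < j → pvRow e W i j = -1 := by
  intro i
  induction i with
  | zero =>
      intro j hj
      have h0 : j ≠ 0 := by omega
      have h1 : j ≠ 1 := by omega
      simp [pvRow, h0, h1]
  | succ i ih =>
      intro j hj
      have h0 : j ≠ 0 := by omega
      show pvRow e W (i + 1) j = -1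
      simp only [pvRow, h0, if_false]
      split
      · rw [ih (j - 1) (by omega)]; simp
      · rfl

-- ---- pvFl / pvF basic facts ----
theorem pvFl_length (e : ℕ → Int) (W : ℕ) : ∀ m, (pvFl e W m).length = m + 1 := by
  intro m
  induction m with
  | zero => rfl
  | succ m ih => simp [pvFl, ih]

theorem pvFl_getD (e : ℕ → Int) (W : ℕ) : ∀ m t, t ≤ m → (pvFl e W m).getD t 0 = pvF e W t := by
  intro m
  induction m with
  | zero => intro t ht; interval_cases t; rfl
  | succ m ih =>
      intro t ht
      by_cases h : t ≤ m
      · have hlt : t < (pvFl e W m).length := by rw [pvFl_length]; omega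
        show ((pvFl e W m) ++ [_]).getD t 0 = _
        rw [List.getD, List.getElem?_append_left hlt, ← List.getD, ih t h]
      · have : t = m + 1 := by omega
        subst this; rfl

theorem pvFl_succ_eq (e : ℕ → Int) (W m : ℕ) :
    pvFl e W (m + 1)
      = pvFl e W m
        ++ [(List.range' 1 (min W (m + 1))).foldl (fun best j =>
              max best ((if 1 ≤ m + 1 - j then (pvFl e W m).getD (m + 1 - j - 1) 0 else 0)
                + pvPf e (m + 1) - pvPf e (m + 1 - j))) ((pvFl e W m).getD m 0)] := rfl

theorem pvF_succ (e : ℕ → Int) (W m : ℕ) :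
    pvF e W (m + 1)
      = (List.range' 1 (min W (m + 1))).foldl (fun b j => max b (pvV e W m j)) (pvF e W m) := by
  show ((pvFl e W m) ++ [_]).getD (m + 1) 0 = _
  rw [List.getD, List.getElem?_append_right (by rw [pvFl_length]), pvFl_length]
  simp only [Nat.sub_self, List.getElem?_cons_zero, Option.getD_some]
  rw [PySem.List.foldl_congr_mem (g := fun b j => max b (pvV e W m j)), pvFl_getD e W m m le_rfl]
  intro acc j hj
  have hj' : 1 ≤ j ∧ j < 1 + min W (m + 1) := by simpa [List.mem_range'_1] using hj
  congr 1
  unfold pvV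
  by_cases h1 : 1 ≤ m + 1 - j
  · have : m + 1 - j - 1 = m - j := by omega
    rw [this]
    simp only [h1, if_true]
    rw [pvFl_getD e W m (m - j) (by omega)]
  · simp [h1]

theorem pvF_zero (e : ℕ → Int) (W : ℕ) : pvF e W 0 = 0 := rfl

theorem pvF_mono (e : ℕ → Int) (W m : ℕ) : pvF e W m ≤ pvF e W (m + 1) := by
  rw [pvF_succ]; exact pv_le_foldl_init _ _ _

theorem pvF_nonneg (e : ℕ → Int) (W : ℕ) : ∀ m, 0 ≤ pvF e W m := by
  intro m
  induction m with
  | zero => simp [pvF_zero]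
  | succ m ih => exact le_trans ih (pvF_mono e W m)

-- pvV unfoldings
theorem pvV_step (e : ℕ → Int) (W i j : ℕ) (h2 : 2 ≤ j) (hj : j ≤ i + 2) :
    pvV e W (i + 1) j = pvV e W i (j - 1) + e (i + 1) := by
  unfold pvV
  have h1 : i + 1 + 1 - j = i + 1 - (j - 1) := by omega
  have h2' : i + 1 - j = i - (j - 1) := by omega
  rw [h1, h2']
  show _ + pvPf e (i + 2) - _ = _
  have : pvPf e (i + 2) = pvPf e (i + 1) + e (i + 1) := rfl
  rw [this]; ring

theorem pvV_one_succ (e : ℕ → Int) (W i : ℕ) :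
    pvV e W (i + 1) 1 = pvF e W i + e (i + 1) := by
  unfold pvV
  have h1 : 1 ≤ i + 1 + 1 - 1 := by omega
  have h2 : i + 1 - 1 = i := by omega
  have h3 : i + 1 + 1 - 1 = i + 1 := by omega
  rw [h2, h3]
  simp only [if_pos (by omega : 1 ≤ i + 1)]
  show _ + pvPf e (i + 2) - _ = _
  have : pvPf e (i + 2) = pvPf e (i + 1) + e (i + 1) := rfl
  rw [this]; ring

theorem pvV_zero_one (e : ℕ → Int) (W : ℕ) : pvV e W 0 1 = e 0 := by
  simp [pvV, pvPf]

-- C3: the row maximum equals B's f, given the row characterization at the same i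
theorem pv_C3 (e : ℕ → Int) (W i : ℕ)
    (h0 : pvRow e W i 0 = pvF e W i)
    (h1 : ∀ j, 1 ≤ j → j ≤ min W (i + 1) → (pvRow e W i j = -1 ∨ pvRow e W i j = pvV e W i j))
    (h2 : ∀ j, 1 ≤ j → j ≤ min W (i + 1) →
        ∃ j', j' ≤ j ∧ j' ≤ W ∧ pvV e W i j ≤ pvRow e W i j') :
    pvMrow e W i = pvF e W (i + 1) := by
  apply le_antisymm
  · unfold pvMrow
    apply (pv_foldl_max_le_iff _ _ _ _).mpr
    refine ⟨pvF_nonneg e W (i + 1), fun j hj => ?_⟩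
    have hjW : j ≤ W := by have := List.mem_range.1 hj; omega
    by_cases hj0 : j = 0
    · subst hj0; rw [h0]; exact pvF_mono e W i
    · by_cases hjle : j ≤ i + 1
      · rcases h1 j (by omega) (by omega) with h | h
        · rw [h]; exact le_trans (by norm_num) (pvF_nonneg e W (i + 1))
        · rw [h, pvF_succ]
          exact pv_le_foldl_mem _ _ _ j (List.mem_range'_1.2 (by omega))
      · rw [pvRow_big e W i j (by omega)]
        exact le_trans (by norm_num) (pvF_nonneg e W (i + 1))
  · rw [pvF_succ]
    apply (pv_foldl_max_le_iff _ _ _ _).mpr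
    constructor
    · rw [← h0]
      exact pv_le_foldl_mem _ _ _ 0 (List.mem_range.2 (by omega))
    · intro j hj
      have hj' : 1 ≤ j ∧ j < 1 + min W (i + 1) := by simpa [List.mem_range'_1] using hj
      obtain ⟨j', _, hj'W, hle⟩ := h2 j hj'.1 (by omega)
      exact le_trans hle (pv_le_foldl_mem _ _ _ j' (List.mem_range.2 (by omega)))

-- the main invariant, by induction on the row index
theorem pv_main (e : ℕ → Int) (W : ℕ) (hW : 1 ≤ W) : ∀ i,
    pvRow e W i 0 = pvF e W i ∧
    (∀ j, 1 ≤ j → j ≤ min W (i + 1) → (pvRow e W i j = -1 ∨ pvRow e W i j = pvV e W i j)) ∧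
    (∀ j, 1 ≤ j → j ≤ min W (i + 1) →
        ∃ j', j' ≤ j ∧ j' ≤ W ∧ pvV e W i j ≤ pvRow e W i j') := by
  intro i
  induction i with
  | zero =>
      refine ⟨rfl, ?_, ?_⟩
      · intro j h1 h2
        have : j = 1 := by omega
        subst this
        right
        rw [pvV_zero_one]
        rfl
      · intro j h1 h2
        have : j = 1 := by omega
        subst this
        exact ⟨1, le_rfl, hW, by rw [pvV_zero_one]; exact le_of_eq rfl⟩
  | succ i ih =>
      obtain ⟨ih0, ih1, ih2⟩ := ih
      have hC3 : pvMrow e W i = pvF e W (i + 1) := pv_C3 e W i ih0 ih1 ih2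
      have h0 : pvRow e W (i + 1) 0 = pvF e W (i + 1) := by
        rw [pvRow_succ_zero]; exact hC3
      -- row value at j = 1 is always the intended value
      have hone : pvRow e W (i + 1) 1 = pvF e W i + e (i + 1) := by
        show pvRow e W (i+1) 1 = _
        simp only [pvRow, if_neg (by omega : (1:ℕ) ≠ 0), if_pos hW]
        have hne : pvRow e W i 0 ≠ -1 := by
          rw [ih0]
          have := pvF_nonneg e W i
          omega
        rw [if_pos hne, ih0]
      have h1 : ∀ j, 1 ≤ j → j ≤ min W (i + 2) →
          (pvRow e W (i + 1) j = -1 ∨ pvRow e W (i + 1) j = pvV e W (i + 1) j) := by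
        intro j hj1 hj2
        by_cases hj : j = 1
        · subst hj
          right
          rw [hone, pvV_one_succ]
        · -- j ≥ 2
          have hj2' : 2 ≤ j := by omega
          have hjW : j ≤ W := by omega
          have hrow : pvRow e W (i + 1) j
              = (if pvRow e W i (j - 1) ≠ -1 then pvRow e W i (j - 1) + e (i + 1) else -1) := by
            simp only [pvRow, if_neg (by omega : j ≠ 0), if_pos hjW]
          by_cases hb : pvRow e W i (j - 1) = -1
          · left; rw [hrow]; simp [hb]
          · rcases ih1 (j - 1) (by omega) (by omega) with h | h
            · exact absurd h hb
            · right
              rw [hrow, if_pos hb, h, ← pvV_step e W i j hj2' (by omega)]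
      have h2 : ∀ j, 1 ≤ j → j ≤ min W (i + 2) →
          ∃ j', j' ≤ j ∧ j' ≤ W ∧ pvV e W (i + 1) j ≤ pvRow e W (i + 1) j' := by
        intro j hj1 hj2
        by_cases hj : j = 1
        · subst hj
          exact ⟨1, le_rfl, hW, by rw [hone, pvV_one_succ]⟩
        · have hj2' : 2 ≤ j := by omega
          have hjW : j ≤ W := by omega
          rcases h1 j hj1 (by omega) with hval | hval
          swap
          · exact ⟨j, le_rfl, hjW, le_of_eq hval.symm⟩
          have hrow : pvRow e W (i + 1) j
              = (if pvRow e W i (j - 1) ≠ -1 then pvRow e W i (j - 1) + e (i + 1) else -1) := by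
            simp only [pvRow, if_neg (by omega : j ≠ 0), if_pos hjW]
          by_cases hb : pvRow e W i (j - 1) = -1
          · -- blocked: use the dominator of row i at j-1
            obtain ⟨t, ht1, htW, hle⟩ := ih2 (j - 1) (by omega) (by omega)
            by_cases ht : pvRow e W i t = -1
            · -- dominator itself is -1: V (i+1) j < row (i+1) 1
              refine ⟨1, by omega, hW, ?_⟩
              rw [hone, pvV_step e W i j hj2' (by omega)]
              have hv : pvV e W i (j - 1) ≤ -1 := by rw [ht] at hle; exact hle
              have := pvF_nonneg e W i
              omega
            · refine ⟨t + 1, by omega, by omega, ?_⟩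
              have hrowt : pvRow e W (i + 1) (t + 1)
                  = pvRow e W i t + e (i + 1) := by
                simp only [pvRow, if_neg (by omega : t + 1 ≠ 0), if_pos (by omega : t + 1 ≤ W)]
                rw [if_pos (by simpa using ht)]
                congr 1
              rw [hrowt, pvV_step e W i j hj2' (by omega)]
              omega
          · -- real value -1: dominated by cell 0
            have hvv : pvRow e W (i + 1) j = pvV e W (i + 1) j := by
              rcases ih1 (j - 1) (by omega) (by omega) with h' | h'
              · exact absurd h' hb
              · rw [hrow, if_pos hb, h', ← pvV_step e W i j hj2' (by omega)]
            refine ⟨0, by omega, by omega, ?_⟩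
            rw [← hvv, hval, h0]
            have := pvF_nonneg e W (i + 1)
            omega
      exact ⟨h0, h1, h2⟩

-- ---- bridge: port A = pvMrow ----

def pvStepA (earnings : List Int) (K : ℕ) (prev : List Int) (i : ℕ) : List Int :=
  let mx := (List.range K).foldl (fun m j => max m (prev.getD j 0)) 0
  let base := (List.replicate K (-1 : Int)).set 0 mx
  (List.range' 1 (K - 1)).foldl (fun row j =>
    if prev.getD (j - 1) 0 ≠ -1 then row.set j (prev.getD (j - 1) 0 + earnings.getD i 0)
    else row) base

theorem pv_row0_spec (earnings : List Int) (W : ℕ) (hW : 1 ≤ W) :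
    (((List.replicate (W + 1) (-1 : Int)).set 0 0).set 1 (earnings.getD 0 0)).length = W + 1 ∧
    ∀ j ≤ W, (((List.replicate (W + 1) (-1 : Int)).set 0 0).set 1 (earnings.getD 0 0)).getD j 0
      = pvRow (fun t => earnings.getD t 0) W 0 j := by
  constructor
  · simp
  · intro j hj
    have hlen : (((List.replicate (W + 1) (-1 : Int)).set 0 0).set 1 (earnings.getD 0 0)).length = W + 1 := by simp
    match j with
    | 0 =>
        rw [List.getD, List.getElem?_set_ne (by omega), List.getElem?_set_self (by simpa using hW)]
        rfl
    | 1 =>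
        rw [List.getD, List.getElem?_set_self (by simpa using hW)]
        rfl
    | (t + 2) =>
        rw [List.getD, List.getElem?_set_ne (by omega), List.getElem?_set_ne (by omega),
          List.getElem?_replicate]
        simp only [if_pos (by omega : t + 2 < W + 1)]
        show (-1 : Int) = pvRow (fun t => earnings.getD t 0) W 0 (t + 2)
        rw [pvRow_big _ W 0 (t + 2) (by omega)]

theorem pvStepA_spec (earnings : List Int) (k : Int) (hk : 1 ≤ k) (prev : List Int) (i : ℕ)
    (hlen : prev.length = k.toNat + 1)
    (hprev : ∀ j ≤ k.toNat, prev.getD j 0 = pvRow (fun t => earnings.getD t 0) k.toNat i j) :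
    (pvStepA earnings ((k + 1).toNat) prev (i + 1)).length = k.toNat + 1 ∧
    ∀ j ≤ k.toNat, (pvStepA earnings ((k + 1).toNat) prev (i + 1)).getD j 0
      = pvRow (fun t => earnings.getD t 0) k.toNat (i + 1) j := by
  set W := k.toNat with hWdef
  set e := fun t => earnings.getD t 0 with hedef
  have hK : (k + 1).toNat = W + 1 := by omega
  have hW : 1 ≤ W := by omega
  unfold pvStepA
  rw [hK]
  simp only [Nat.add_sub_cancel]
  have hmx : (List.range (W + 1)).foldl (fun m j => max m (prev.getD j 0)) 0 = pvMrow e W i := by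
    unfold pvMrow
    apply PySem.List.foldl_congr_mem
    intro acc j hj
    rw [hprev j (by have := List.mem_range.1 hj; omega)]
  rw [hmx]
  set base := (List.replicate (W + 1) (-1 : Int)).set 0 (pvMrow e W i) with hbase
  have hbaselen : base.length = W + 1 := by simp [hbase]
  have hbaseget : ∀ j ≤ W, base.getD j 0 = if j = 0 then pvMrow e W i else -1 := by
    intro j hj
    match j with
    | 0 =>
        rw [hbase, List.getD, List.getElem?_set_self (by simp)]
        rfl
    | (t + 1) =>
        rw [hbase, List.getD, List.getElem?_set_ne (by omega), List.getElem?_replicate,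
          if_pos (by omega : t + 1 < W + 1)]
        rfl
  constructor
  · rw [pv_foldl_setif_length (c := fun j => prev.getD (j - 1) 0 ≠ -1)
      (v := fun j => prev.getD (j - 1) 0 + earnings.getD (i + 1) 0), hbaselen]
  · intro j hj
    rw [pv_foldl_setif_getD (c := fun j => prev.getD (j - 1) 0 ≠ -1)
      (v := fun j => prev.getD (j - 1) 0 + earnings.getD (i + 1) 0) _ _ j (by omega)]
    by_cases hj0 : j = 0
    · subst hj0
      have : ¬ ((0 : ℕ) ∈ List.range' 1 W ∧ prev.getD (0 - 1) 0 ≠ -1) := by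
        rintro ⟨hm, _⟩
        have := List.mem_range'_1.1 hm
        omega
      rw [if_neg this, hbaseget 0 (by omega)]
      simp [pvRow_succ_zero]
    · have hmem : j ∈ List.range' 1 W := List.mem_range'_1.2 (by omega)
      have hrow : pvRow e W (i + 1) j
          = (if pvRow e W i (j - 1) ≠ -1 then pvRow e W i (j - 1) + e (i + 1) else -1) := by
        simp only [pvRow, if_neg hj0, if_pos hj]
      rw [hrow, ← hprev (j - 1) (by omega)]
      by_cases hc : prev.getD (j - 1) 0 ≠ -1
      · rw [if_pos ⟨hmem, hc⟩, if_pos hc]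
      · rw [if_neg (by tauto), if_neg hc, hbaseget j hj, if_neg hj0]

theorem pv_portA_fold (earnings : List Int) (k : Int) (hk : 1 ≤ k) : ∀ i,
    (((List.range' 1 i).foldl (pvStepA earnings ((k + 1).toNat))
        (((List.replicate ((k + 1).toNat) (-1 : Int)).set 0 0).set 1 (earnings.getD 0 0))).length
      = k.toNat + 1) ∧
    ∀ j ≤ k.toNat,
      ((List.range' 1 i).foldl (pvStepA earnings ((k + 1).toNat))
        (((List.replicate ((k + 1).toNat) (-1 : Int)).set 0 0).set 1 (earnings.getD 0 0))).getD j 0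
      = pvRow (fun t => earnings.getD t 0) k.toNat i j := by
  have hK : (k + 1).toNat = k.toNat + 1 := by omega
  intro i
  induction i with
  | zero =>
      simpa [hK] using pv_row0_spec earnings k.toNat (by omega)
  | succ i ih =>
      have hconcat : List.range' 1 (i + 1) = List.range' 1 i ++ [1 + i] := by
        simpa using (List.range'_concat (s := 1) (n := i) (step := 1))
      rw [hconcat, List.foldl_append, List.foldl_cons, List.foldl_nil]
      have := pvStepA_spec earnings k hk _ i ih.1 ih.2
      simpa [Nat.add_comm 1 i] using this

theorem pv_portA_eq (earnings : List Int) (k : Int) (hk : 1 ≤ k) (hne : earnings ≠ []) :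
    maximize_earnings earnings k
      = pvMrow (fun t => earnings.getD t 0) k.toNat (earnings.length - 1) := by
  have hn : earnings.length ≠ 0 := by simpa using hne
  unfold maximize_earnings
  rw [if_neg hn]
  have hK : (k + 1).toNat = k.toNat + 1 := by omega
  have hfold := pv_portA_fold earnings k hk (earnings.length - 1)
  rw [hK] at hfold
  show (List.range ((k+1).toNat)).foldl (fun m j => max m (((List.range' 1 (earnings.length - 1)).foldl
      (pvStepA earnings ((k + 1).toNat)) _).getD j 0)) 0 = _
  unfold pvMrow
  rw [hK]
  apply PySem.List.foldl_congr_mem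
  intro acc j hj
  rw [hfold.2 j (by have := List.mem_range.1 hj; omega)]

-- ---- bridge: port B = pvF ----

theorem pv_portB_pre (earnings : List Int) : ∀ m,
    (List.range m).foldl (fun p i => p ++ [p.getD i 0 + earnings.getD i 0]) [(0 : Int)]
      = (List.range (m + 1)).map (pvPf (fun t => earnings.getD t 0)) := by
  intro m
  induction m with
  | zero => rfl
  | succ m ih =>
      rw [List.range_succ, List.foldl_append, List.foldl_cons, List.foldl_nil, ih]
      rw [List.range_succ (n := m + 1), List.map_append]
      congr 1
      have : ((List.range (m + 1)).map (pvPf fun t => earnings.getD t 0)).getD m 0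
          = pvPf (fun t => earnings.getD t 0) m := by
        rw [List.getD, List.getElem?_map, List.getElem?_range (by omega)]
        rfl
      rw [this]
      rfl

theorem pv_map_pvPf_getD (earnings : List Int) (m t : ℕ) (ht : t ≤ m) :
    ((List.range (m + 1)).map (pvPf (fun t => earnings.getD t 0))).getD t 0
      = pvPf (fun t => earnings.getD t 0) t := by
  rw [List.getD, List.getElem?_map, List.getElem?_range (by omega)]
  rfl

theorem pv_portB_f (earnings : List Int) (k : Int) (hk : 1 ≤ k) : ∀ m, m ≤ earnings.length →
    (List.range' 1 m).foldl (fun f (i : ℕ) =>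
      let mm := (min k (i : Int)).toNat
      let best := (List.range' 1 mm).foldl (fun best j =>
        let start := i - j
        let before := if 1 ≤ start then f.getD (start - 1) 0 else 0
        max best (before
          + ((List.range (earnings.length + 1)).map (pvPf (fun t => earnings.getD t 0))).getD i 0
          - ((List.range (earnings.length + 1)).map (pvPf (fun t => earnings.getD t 0))).getD start 0))
        (f.getD (i - 1) 0)
      f ++ [best]) [(0 : Int)]
    = pvFl (fun t => earnings.getD t 0) k.toNat m := by
  set e := fun t => earnings.getD t 0 with hedef
  intro m
  induction m with
  | zero => intro _; rfl
  | succ m ih =>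
      intro hm
      have hconcat : List.range' 1 (m + 1) = List.range' 1 m ++ [1 + m] := by
        simpa using (List.range'_concat (s := 1) (n := m) (step := 1))
      have hi : 1 + m = m + 1 := by omega
      rw [hconcat, hi, List.foldl_append, List.foldl_cons, List.foldl_nil, ih (by omega)]
      show pvFl e k.toNat m ++ [_] = pvFl e k.toNat (m + 1)
      rw [pvFl_succ_eq]
      congr 1
      congr 1
      have hmin : (min k ((m + 1 : ℕ) : Int)).toNat = min k.toNat (m + 1) := by omega
      show (List.range' 1 ((min k ((m + 1 : ℕ) : Int)).toNat)).foldl _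
          ((pvFl e k.toNat m).getD (m + 1 - 1) 0) = _
      rw [hmin]
      apply PySem.List.foldl_congr_mem
      intro acc j hj
      have hj' := List.mem_range'_1.1 hj
      simp only
      rw [pv_map_pvPf_getD earnings _ (m + 1) (by omega),
        pv_map_pvPf_getD earnings _ (m + 1 - j) (by omega)]

theorem pv_portB_eq (earnings : List Int) (k : Int) (hk : 1 ≤ k) :
    maximize_earnings_alt earnings k = pvF (fun t => earnings.getD t 0) k.toNat earnings.length := by
  simp only [maximize_earnings_alt]
  rw [pv_portB_pre earnings earnings.length]
  rw [pv_portB_f earnings k hk earnings.length le_rfl]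
  rfl

-- ===== VERDICT (by name: the statement is the Claim_ definition above) =====
theorem maximize_earnings_spec : Claim_equal_maximize_earnings := by
  intro earnings k _ hpre
  unfold Spec_maximize_earnings
  by_cases hne : earnings = []
  · subst hne; rfl
  · have hk : 1 ≤ k := by
      rcases hpre with h | h
      · exact absurd h hne
      · exact h
    have hn : 1 ≤ earnings.length := by
      cases earnings with
      | nil => exact absurd rfl hne
      | cons a l => simp
    rw [pv_portA_eq earnings k hk hne, pv_portB_eq earnings k hk]
    have := (pv_main (fun t => earnings.getD t 0) k.toNat (by omega) (earnings.length - 1))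
    have h3 := pv_C3 _ _ _ this.1 this.2.1 this.2.2
    rw [show earnings.length - 1 + 1 = earnings.length from by omega] at h3
    exact h3
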